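-- pv_equiv track=rewrite | github.com/filmstorm/WHAM | wham_to_bvh_scene.py | create_character_joint_order
-- ===== SOURCE A (Python) =====
-- def create_character_joint_order(char_name):
--     """Create joint order for one character"""
--     joint_order = [char_name]  # Character root
--
--     joint_hierarchy = {
--         'root': ['Pelvis'],
--         'Pelvis': ['L_Hip', 'R_Hip', 'Spine1'],
--         'L_Hip': ['L_Knee'],
--         'R_Hip': ['R_Knee'],
--         'Spine1': ['Spine2'],
--         'L_Knee': ['L_Ankle'],
--         'R_Knee': ['R_Ankle'],
--         'Spine2': ['Spine3'],
--         'L_Ankle': ['L_Foot'],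
--         'R_Ankle': ['R_Foot'],
--         'Spine3': ['Neck', 'L_Collar', 'R_Collar'],
--         'Neck': ['Head'],
--         'L_Collar': ['L_Shoulder'],
--         'R_Collar': ['R_Shoulder'],
--         'L_Shoulder': ['L_Elbow'],
--         'R_Shoulder': ['R_Elbow'],
--         'L_Elbow': ['L_Wrist'],
--         'R_Elbow': ['R_Wrist'],
--         'L_Wrist': ['L_Hand'],
--         'R_Wrist': ['R_Hand'],
--         'Head': [],
--         'L_Foot': [],
--         'R_Foot': [],
--         'L_Hand': [],
--         'R_Hand': []
--     }
--
--     def traverse(joint_name):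
--         children = joint_hierarchy[joint_name]
--         for child in children:
--             joint_order.append(f"{char_name}_{child}")
--             traverse(child)
--
--     traverse('root')
--     return joint_order
-- ===== SOURCE B (Python) =====
-- # The joint hierarchy is a fixed constant, so its preorder is a fixed sequence:
-- # no dict and no traversal needed, just prefix each joint with the character name.
-- _PREORDER_JOINTS = [
--     'Pelvis',
--     'L_Hip', 'L_Knee', 'L_Ankle', 'L_Foot',
--     'R_Hip', 'R_Knee', 'R_Ankle', 'R_Foot',
--     'Spine1', 'Spine2', 'Spine3',
--     'Neck', 'Head',
--     'L_Collar', 'L_Shoulder', 'L_Elbow', 'L_Wrist', 'L_Hand',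
--     'R_Collar', 'R_Shoulder', 'R_Elbow', 'R_Wrist', 'R_Hand',
-- ]
--
-- def create_character_joint_order(char_name):
--     """Create joint order for one character (precomputed preorder of the fixed hierarchy)"""
--     return [char_name] + [f"{char_name}_{j}" for j in _PREORDER_JOINTS]
-- ===== Notes on version B (the rewrite author's own statement) =====
-- stated objective: simpler
-- what changed: Since the hierarchy dict is a fixed literal, B drops the dict and the recursive traversal entirely and returns the precomputed preorder joint list prefixed with the character name in one comprehension.
import Mathlib
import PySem

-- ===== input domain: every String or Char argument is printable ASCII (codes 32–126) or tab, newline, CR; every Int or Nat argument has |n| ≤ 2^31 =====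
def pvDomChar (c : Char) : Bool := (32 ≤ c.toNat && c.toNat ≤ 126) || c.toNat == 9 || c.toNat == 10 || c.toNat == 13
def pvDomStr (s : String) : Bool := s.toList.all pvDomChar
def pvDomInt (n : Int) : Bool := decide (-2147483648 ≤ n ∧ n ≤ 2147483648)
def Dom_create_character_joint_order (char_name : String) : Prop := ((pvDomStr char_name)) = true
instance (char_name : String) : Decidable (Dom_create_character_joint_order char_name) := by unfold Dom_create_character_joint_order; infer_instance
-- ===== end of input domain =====

-- ===== PORT A =====
-- B replaces A's recursive dict traversal with a precomputed preorder constant list; same value.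
-- A's joint hierarchy dict literal.
def pvHierarchy : PySem.Dict String (List String) :=
  PySem.Dict.ofList [("root", ["Pelvis"]),
    ("Pelvis", ["L_Hip", "R_Hip", "Spine1"]),
    ("L_Hip", ["L_Knee"]), ("R_Hip", ["R_Knee"]), ("Spine1", ["Spine2"]),
    ("L_Knee", ["L_Ankle"]), ("R_Knee", ["R_Ankle"]), ("Spine2", ["Spine3"]),
    ("L_Ankle", ["L_Foot"]), ("R_Ankle", ["R_Foot"]),
    ("Spine3", ["Neck", "L_Collar", "R_Collar"]),
    ("Neck", ["Head"]), ("L_Collar", ["L_Shoulder"]), ("R_Collar", ["R_Shoulder"]),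
    ("L_Shoulder", ["L_Elbow"]), ("R_Shoulder", ["R_Elbow"]),
    ("L_Elbow", ["L_Wrist"]), ("R_Elbow", ["R_Wrist"]),
    ("L_Wrist", ["L_Hand"]), ("R_Wrist", ["R_Hand"]),
    ("Head", []), ("L_Foot", []), ("R_Foot", []), ("L_Hand", []), ("R_Hand", [])]

-- Python's recursive `traverse`; fuel bounds the recursion depth (the fixed hierarchy is a tree of
-- depth < 32, so the fuel is never exhausted and the port is exact). `joint_hierarchy[joint_name]`
-- always hits a key here, so getD [] is exact.
def pvTraverseA (char_name : String) : Nat → String → List String → List String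
  | 0, _, acc => acc
  | fuel+1, joint_name, acc =>
      ((pvHierarchy.get? joint_name).getD []).foldl
        (fun acc child => pvTraverseA char_name fuel child (acc ++ [char_name ++ "_" ++ child])) acc

def create_character_joint_order (char_name : String) : List String :=
  pvTraverseA char_name 32 "root" [char_name]

-- ===== PORT B =====
-- Source B's precomputed preorder of the fixed hierarchy.
def pvPreorderJoints : List String :=
  ["Pelvis",
   "L_Hip", "L_Knee", "L_Ankle", "L_Foot",
   "R_Hip", "R_Knee", "R_Ankle", "R_Foot",
   "Spine1", "Spine2", "Spine3",
   "Neck", "Head",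
   "L_Collar", "L_Shoulder", "L_Elbow", "L_Wrist", "L_Hand",
   "R_Collar", "R_Shoulder", "R_Elbow", "R_Wrist", "R_Hand"]

def create_character_joint_order_alt (char_name : String) : List String :=
  char_name :: pvPreorderJoints.map (fun j => char_name ++ "_" ++ j)

-- ===== PRECONDITION & SPEC =====
def Spec_create_character_joint_order (char_name : String) (out : List String) : Prop := out = create_character_joint_order_alt char_name
instance (char_name : String) (out : List String) : Decidable (Spec_create_character_joint_order char_name out) := by unfold Spec_create_character_joint_order; infer_instance

-- ===== CLAIM =====
def Claim_equal_create_character_joint_order : Prop := ∀ (char_name : String), Dom_create_character_joint_order char_name → Spec_create_character_joint_order char_name (create_character_joint_order char_name)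

-- ===== LEMMAS AND PROOFS =====

-- ===== VERDICT =====
set_option maxHeartbeats 2000000 in
theorem create_character_joint_order_spec : Claim_equal_create_character_joint_order := by
  intro char_name _
  unfold Spec_create_character_joint_order create_character_joint_order create_character_joint_order_alt
  simp [pvTraverseA, pvHierarchy, pvPreorderJoints, PySem.Dict.get?, PySem.Dict.ofList, PySem.Dict.empty, PySem.Dict.update, PySem.Dict.insert, List.find?]
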